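-- pv_equiv track=rewrite | github.com/HalfCodedPrince/hot_cold_rain | tools/generate_indices_and_digest.py | md_systems_digest
-- ===== SOURCE A (Python) =====
-- from collections import defaultdict
--
-- def md_systems_digest(systems, today):
--     groups = defaultdict(list)
--     for rid,name,gloss,path in systems:
--         parts = path.split('/')
--         family = parts[2] if len(parts) > 2 else "general"
--         if family.endswith(".md"):
--             family = "general"
--         groups[family].append((rid,name,gloss,path))
--
--     lines = ["---","id: PACK:SYSTEMS-DIGEST","name: Systems Digest — Claims & Links","status: Stable",f"updated: {today}","---",""]
--     lines += ["This digest lists each system page with its ID and canonical path. Keep claims in the source pages; this file is compact routing.", ""]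
--     for family in sorted(groups.keys()):
--         lines += [f"## {family.title()}", ""]
--         for rid,name,gloss,path in sorted(groups[family], key=lambda x: x[3].lower()):
--             lines += [f"### {name}", f"`{rid}` — {path}"]
--             if gloss: lines += [f"- Tags: {gloss}"]
--             lines += [""]
--     return "\n".join(lines) + "\n"
-- ===== SOURCE B (Python) =====
-- def md_systems_digest(systems, today):
--     def family_of(path):
--         parts = path.split('/')
--         fam = parts[2] if len(parts) > 2 else "general"
--         return "general" if fam.endswith(".md") else fam
--
--     # two stable sorts = one sort by the composite key (family, path.lower())
--     rows = sorted(systems, key=lambda r: r[3].lower())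
--     rows = sorted(rows, key=lambda r: family_of(r[3]))
--     out = ["---", "id: PACK:SYSTEMS-DIGEST", "name: Systems Digest — Claims & Links",
--            "status: Stable", f"updated: {today}", "---", "",
--            "This digest lists each system page with its ID and canonical path. Keep claims in the source pages; this file is compact routing.", ""]
--     prev = None
--     for rid, name, gloss, path in rows:
--         fam = family_of(path)
--         if prev != fam:
--             out += [f"## {fam.title()}", ""]
--             prev = fam
--         out += [f"### {name}", f"`{rid}` — {path}"]
--         if gloss:
--             out += [f"- Tags: {gloss}"]
--         out += [""]
--     return "\n".join(out) + "\n"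
-- ===== Notes on version B (the rewrite author's own statement) =====
-- stated objective: alternative
-- what changed: B replaces A's defaultdict grouping followed by sorting the keys and each group separately with two stable whole-list sorts (by lowercased path, then by family) and a single pass that emits a family header whenever the family changes.
import Mathlib
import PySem

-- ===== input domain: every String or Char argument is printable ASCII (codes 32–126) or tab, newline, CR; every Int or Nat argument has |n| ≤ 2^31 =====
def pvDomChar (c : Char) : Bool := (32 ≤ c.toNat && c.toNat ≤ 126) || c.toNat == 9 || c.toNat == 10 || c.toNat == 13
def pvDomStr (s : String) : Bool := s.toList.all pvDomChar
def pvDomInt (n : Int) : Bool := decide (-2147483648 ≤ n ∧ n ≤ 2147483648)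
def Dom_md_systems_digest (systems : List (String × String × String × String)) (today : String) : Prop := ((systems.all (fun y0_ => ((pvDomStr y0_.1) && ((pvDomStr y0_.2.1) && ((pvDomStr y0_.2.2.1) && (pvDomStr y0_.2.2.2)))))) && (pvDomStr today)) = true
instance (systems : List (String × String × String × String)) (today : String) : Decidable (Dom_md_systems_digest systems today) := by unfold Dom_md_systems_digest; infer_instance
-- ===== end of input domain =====

-- B replaces A's defaultdict grouping (group → sort keys → sort each group) by two stable
-- whole-list sorts (secondary key then primary key) and a single emission pass that prints a
-- family header whenever the family changes; same return value, objective: alternative.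

-- str.title() for the ASCII domain: the first alphabetic character of each run is uppercased,
-- the following alphabetic characters lowercased (exact on ASCII; both Pythons call .title()).
def pvTitleChars : List Char → Bool → List Char
  | [], _ => []
  | c :: cs, prevAlpha =>
    (if PySem.Chars.isalpha c then
       (if prevAlpha then PySem.Chars.lowerChar c else PySem.Chars.upperChar c)
     else c) :: pvTitleChars cs (PySem.Chars.isalpha c)

def pvTitle (s : String) : String := String.ofList (pvTitleChars s.toList false)

-- family of a path: parts = path.split('/'); parts[2] if len > 2 else "general"; '.md' → "general"
-- (both Pythons compute this, A inline per row, B in its local helper `family_of`)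
def pvFamily (path : String) : String :=
  let parts := (PySem.Str.split? path "/").getD []
  let family := match PySem.List.pyGet? parts 2 with
                | some f => f
                | none => "general"
  if PySem.Str.endswith family ".md" then "general" else family

-- ===== PORT A =====
def md_systems_digest (systems : List (String × String × String × String)) (today : String) : String :=
  let groups : PySem.Dict String (List (String × String × String × String)) :=
    systems.foldl (fun d r => d.modify (pvFamily r.2.2.2) [] (fun l => l ++ [r])) PySem.Dict.empty
  let lines : List String :=
    ["---", "id: PACK:SYSTEMS-DIGEST", "name: Systems Digest — Claims & Links", "status: Stable",
     "updated: " ++ today, "---", ""]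
  let lines := lines ++
    ["This digest lists each system page with its ID and canonical path. Keep claims in the source pages; this file is compact routing.", ""]
  let lines :=
    (PySem.List.sorted groups.keys (fun f => f)).foldl
      (fun acc f =>
        (PySem.List.sorted (groups.getD f []) (fun r => PySem.Str.lower r.2.2.2)).foldl
          (fun acc2 r =>
            acc2 ++ ["### " ++ r.2.1, "`" ++ r.1 ++ "` — " ++ r.2.2.2] ++
              (if r.2.2.1 ≠ "" then ["- Tags: " ++ r.2.2.1] else []) ++ [""])
          (acc ++ ["## " ++ pvTitle f, ""]))
      lines
  PySem.Str.join "\n" lines ++ "\n"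

-- ===== PORT B =====
def md_systems_digest_alt (systems : List (String × String × String × String)) (today : String) : String :=
  let rows := PySem.List.sorted systems (fun r => PySem.Str.lower r.2.2.2)
  let rows := PySem.List.sorted rows (fun r => pvFamily r.2.2.2)
  let out : List String :=
    ["---", "id: PACK:SYSTEMS-DIGEST", "name: Systems Digest — Claims & Links", "status: Stable",
     "updated: " ++ today, "---", "",
     "This digest lists each system page with its ID and canonical path. Keep claims in the source pages; this file is compact routing.", ""]
  let st :=
    rows.foldl
      (fun (st : List String × Option String) r =>
        let fam := pvFamily r.2.2.2
        let out := if st.2 ≠ some fam then st.1 ++ ["## " ++ pvTitle fam, ""] else st.1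
        (out ++ ["### " ++ r.2.1, "`" ++ r.1 ++ "` — " ++ r.2.2.2] ++
           (if r.2.2.1 ≠ "" then ["- Tags: " ++ r.2.2.1] else []) ++ [""], some fam))
      (out, none)
  PySem.Str.join "\n" st.1 ++ "\n"

-- ===== PRECONDITION & SPEC =====
def Spec_md_systems_digest (systems : List (String × String × String × String)) (today : String) (out : String) : Prop := out = md_systems_digest_alt systems today
instance (systems : List (String × String × String × String)) (today : String) (out : String) : Decidable (Spec_md_systems_digest systems today out) := by unfold Spec_md_systems_digest; infer_instance

-- ===== CLAIM (what is proved, stated in full; the proofs are below) =====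
def Claim_equal_md_systems_digest : Prop := ∀ (systems : List (String × String × String × String)) (today : String), Dom_md_systems_digest systems today → Spec_md_systems_digest systems today (md_systems_digest systems today)

-- ===== LEMMAS AND PROOFS =====

-- abbreviations for the proof
abbrev pvR := String × String × String × String
def pvK1 (r : pvR) : String := pvFamily r.2.2.2
def pvK2 (r : pvR) : String := PySem.Str.lower r.2.2.2
def pvRowL (r : pvR) : List String :=
  ["### " ++ r.2.1, "`" ++ r.1 ++ "` — " ++ r.2.2.2] ++
    (if r.2.2.1 ≠ "" then ["- Tags: " ++ r.2.2.1] else []) ++ [""]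
def pvHdrF (f : String) : List String := ["## " ++ pvTitle f, ""]
def pvGrp (xs : List pvR) (f : String) : List pvR := xs.filter (fun r => pvK1 r == f)
def pvFams (xs : List pvR) : List String :=
  PySem.List.sorted (PySem.Set.ofList (xs.map pvK1)) (fun f => f)
def pvC (xs : List pvR) (f : String) : List pvR := PySem.List.sorted (pvGrp xs f) pvK2
def pvHeader (today : String) : List String :=
  ["---", "id: PACK:SYSTEMS-DIGEST", "name: Systems Digest — Claims & Links", "status: Stable",
   "updated: " ++ today, "---", "",
   "This digest lists each system page with its ID and canonical path. Keep claims in the source pages; this file is compact routing.", ""]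
def pvBody (xs : List pvR) : List String :=
  (pvFams xs).flatMap (fun f => pvHdrF f ++ (pvC xs f).flatMap pvRowL)

-- A in normal form
theorem pvDict_keys (systems : List pvR) :
    (systems.foldl (fun d r => d.modify (pvFamily r.2.2.2) [] (fun l => l ++ [r])) PySem.Dict.empty).keys
      = PySem.Set.ofList (systems.map pvK1) := by
  have h := PySem.Dict.keys_foldl_modify_key systems (fun r => pvFamily r.2.2.2) [] (fun d r l => l ++ [r]) PySem.Dict.empty
  simpa [PySem.Dict.keys_empty, PySem.Set.update, PySem.Set.ofList_eq_foldl, pvK1] using h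

theorem pvDict_getD (systems : List pvR) (f : String) :
    (systems.foldl (fun d r => d.modify (pvFamily r.2.2.2) [] (fun l => l ++ [r])) PySem.Dict.empty).getD f []
      = pvGrp systems f := by
  rw [show (systems.foldl (fun d r => d.modify (pvFamily r.2.2.2) [] (fun l => l ++ [r])) PySem.Dict.empty)
       = (systems.map (fun r => (pvK1 r, r))).foldl (fun d p => d.modify p.1 [] (fun l => l ++ [p.2])) PySem.Dict.empty
     from by rw [List.foldl_map]; rfl]
  rw [PySem.Dict.getD_foldl_modify_append]
  simp [List.filter_map, Function.comp_def, List.map_map, pvK1, pvGrp]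

theorem pvA_norm (systems : List pvR) (today : String) :
    md_systems_digest systems today = PySem.Str.join "\n" (pvHeader today ++ pvBody systems) ++ "\n" := by
  simp only [md_systems_digest]
  rw [pvDict_keys]
  have hinner : ∀ (l : List pvR) (a0 : List String),
      l.foldl (fun acc2 r =>
        acc2 ++ ["### " ++ r.2.1, "`" ++ r.1 ++ "` — " ++ r.2.2.2] ++
          (if r.2.2.1 ≠ "" then ["- Tags: " ++ r.2.2.1] else []) ++ [""]) a0
        = a0 ++ l.flatMap pvRowL := by
    intro l a0
    rw [PySem.List.foldl_congr_mem l _ (fun acc2 r => acc2 ++ pvRowL r) a0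
      (by intro acc x _; simp [pvRowL])]
    exact PySem.List.foldl_append_eq_flatMap pvRowL l a0
  simp only [pvDict_getD, hinner]
  rw [PySem.List.foldl_congr_mem _ _
      (fun acc f => acc ++ (pvHdrF f ++ (pvC systems f).flatMap pvRowL)) _
      (by intro acc f _; simp [pvHdrF, pvC]; rfl)]
  rw [PySem.List.foldl_append_eq_flatMap]
  rfl

-- small insertBy facts
theorem pvInsertBy_cons {α : Type} (bef : α → α → Bool) (x y : α) (ys : List α) :
    PySem.List.insertBy bef x (y :: ys) =
      if bef x y then x :: y :: ys else y :: PySem.List.insertBy bef x ys := rfl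

theorem pvInsertBy_all_true {α : Type} (bef : α → α → Bool) (x : α) (l : List α)
    (h : ∀ y ∈ l, bef x y = true) : PySem.List.insertBy bef x l = x :: l := by
  cases l with
  | nil => rfl
  | cons y ys => rw [pvInsertBy_cons, h y (List.mem_cons_self)]; simp

theorem pvInsertBy_append_left {α : Type} (bef : α → α → Bool) (x : α) (l1 l2 : List α)
    (h : ∀ y ∈ l1, bef x y = false) :
    PySem.List.insertBy bef x (l1 ++ l2) = l1 ++ PySem.List.insertBy bef x l2 := by
  induction l1 with
  | nil => rfl
  | cons y ys ih =>
    rw [List.cons_append, pvInsertBy_cons, h y (List.mem_cons_self)]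
    simp only [Bool.false_eq_true, if_false, List.cons_append, List.cons_inj_right]
    exact ih (fun z hz => h z (List.mem_cons_of_mem _ hz))

theorem pvFlatMap_congr {α β : Type} (l : List α) (f g : α → List β)
    (h : ∀ a ∈ l, f a = g a) : l.flatMap f = l.flatMap g := by
  induction l with
  | nil => rfl
  | cons a l ih => simp only [List.flatMap_cons, h a List.mem_cons_self,
      ih (fun b hb => h b (List.mem_cons_of_mem _ hb))]

-- M1: stable sort commutes with filter (stability)
theorem pvFilter_insertBy (x : pvR) (p : pvR → Bool) (l : List pvR)
    (hl : l.Pairwise (fun a b => pvK2 a ≤ pvK2 b)) :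
    (PySem.List.insertBy (fun a b => decide (pvK2 a < pvK2 b)) x l).filter p =
      if p x then PySem.List.insertBy (fun a b => decide (pvK2 a < pvK2 b)) x (l.filter p)
      else l.filter p := by
  induction l with
  | nil =>
    by_cases hp : p x <;> simp [PySem.List.insertBy, hp]
  | cons y ys ih =>
    obtain ⟨hy, htl⟩ := List.pairwise_cons.mp hl
    rw [pvInsertBy_cons]
    by_cases hb : pvK2 x < pvK2 y
    · have hbd : (decide (pvK2 x < pvK2 y)) = true := by simpa using hb
      rw [hbd, if_pos rfl]
      have hall : ∀ z ∈ (y :: ys).filter p, (fun a b => decide (pvK2 a < pvK2 b)) x z = true := by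
        intro z hz
        have hz' := List.mem_of_mem_filter hz
        rcases List.mem_cons.mp hz' with h | h
        · subst h; simpa using hb
        · simpa using lt_of_lt_of_le hb (hy z h)
      rw [pvInsertBy_all_true _ x _ hall, List.filter_cons]
    · have hbd : (decide (pvK2 x < pvK2 y)) = false := by simpa using hb
      rw [hbd, if_neg (by simp), List.filter_cons, List.filter_cons, ih htl]
      have hb' : ¬ (pvK2 x).toList < (pvK2 y).toList := by
        simpa [String.lt_iff] using hb
      by_cases hp : p x <;> by_cases hpy : p y <;>
        simp [hp, hpy, pvInsertBy_cons, hb']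

theorem pvM1 (xs : List pvR) (p : pvR → Bool) :
    (PySem.List.sorted xs pvK2).filter p = PySem.List.sorted (xs.filter p) pvK2 := by
  induction xs using List.reverseRecOn with
  | nil => rfl
  | append_singleton xs x ih =>
    have hstep : ∀ (l : List pvR) (z : pvR), PySem.List.sorted (l ++ [z]) pvK2
        = PySem.List.insertBy (fun a b => decide (pvK2 a < pvK2 b)) z (PySem.List.sorted l pvK2) := by
      intro l z
      rw [PySem.List.sorted_eq_foldl_insertBy, PySem.List.sorted_eq_foldl_insertBy, List.foldl_append]
      rfl
    rw [hstep, pvFilter_insertBy x p _ (PySem.List.sorted_pairwise xs pvK2), List.filter_append]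
    by_cases hp : p x
    · simp only [List.filter_cons, hp, if_true, List.filter_nil, hstep, ih]
    · simp only [List.filter_cons, hp, Bool.false_eq_true, if_false, List.filter_nil, List.append_nil, ih]

-- H: inserting into a family-block concatenation
theorem pvH (x : pvR) (B : String → List pvR) (fs : List String)
    (hfs : fs.Pairwise (· < ·))
    (hB : ∀ f, ∀ r ∈ B f, pvK1 r = f)
    (h0 : pvK1 x ∉ fs → B (pvK1 x) = []) :
    PySem.List.insertBy (fun a b => decide (pvK1 a < pvK1 b)) x (fs.flatMap B) =
      (if pvK1 x ∈ fs then fs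
       else PySem.List.insertBy (fun a b => decide (a < b)) (pvK1 x) fs).flatMap
        (fun f => B f ++ if f = pvK1 x then [x] else []) := by
  induction fs with
  | nil =>
    have h0' := h0 (List.not_mem_nil)
    simp [PySem.List.insertBy, h0']
  | cons f fs' ih =>
    obtain ⟨hf, htl⟩ := List.pairwise_cons.mp hfs
    rcases lt_trichotomy (pvK1 x) f with hlt | heq | hgt
    · -- new family, smaller than every present family
      have hnot : pvK1 x ∉ f :: fs' := by
        intro hmem
        rcases List.mem_cons.mp hmem with h | h
        · exact absurd (h ▸ hlt) (lt_irrefl _)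
        · exact absurd (lt_trans hlt (hf _ h)) (lt_irrefl _)
      have hdrop : ∀ g ∈ f :: fs', (fun g => B g ++ if g = pvK1 x then [x] else []) g = B g := by
        intro g hg
        have hne : g ≠ pvK1 x := fun h => hnot (h ▸ hg)
        simp [hne]
      have hins : PySem.List.insertBy (fun a b => decide (a < b)) (pvK1 x) (f :: fs')
          = pvK1 x :: f :: fs' := by
        rw [pvInsertBy_cons, show (decide ((pvK1 x) < f)) = true from by simpa using hlt, if_pos rfl]
      have hR : List.flatMap (fun g => B g ++ if g = pvK1 x then [x] else []) (pvK1 x :: f :: fs')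
          = x :: List.flatMap B (f :: fs') := by
        rw [List.flatMap_cons, h0 hnot, pvFlatMap_congr _ _ B hdrop]
        simp
      rw [if_neg hnot, hins, hR]
      refine pvInsertBy_all_true _ x _ ?_
      intro y hy
      obtain ⟨g, hg, hyg⟩ := List.mem_flatMap.mp hy
      have h1 : pvK1 y = g := hB g y hyg
      have h2 : pvK1 x < g := by
        rcases List.mem_cons.mp hg with h | h
        · exact h ▸ hlt
        · exact lt_trans hlt (hf _ h)
      rw [h1, decide_eq_true_eq]
      exact h2
    · -- x's family is the first listed family
      have hmem : pvK1 x ∈ f :: fs' := heq ▸ List.mem_cons_self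
      have hdrop : ∀ g ∈ fs', (fun g => B g ++ if g = pvK1 x then [x] else []) g = B g := by
        intro g hg
        have hne : g ≠ pvK1 x := by
          intro h
          exact absurd (heq ▸ h ▸ hf g hg) (lt_irrefl _)
        simp [hne]
      have hR : List.flatMap (fun g => B g ++ if g = pvK1 x then [x] else []) (f :: fs')
          = B f ++ [x] ++ List.flatMap B fs' := by
        rw [List.flatMap_cons, pvFlatMap_congr _ _ B hdrop, if_pos heq.symm, List.append_assoc]
      rw [if_pos hmem, hR, List.flatMap_cons]
      rw [pvInsertBy_append_left _ x _ _ (by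
        intro y hy
        have h1 : pvK1 y = f := hB f y hy
        rw [h1, decide_eq_false_iff_not, ← heq]
        exact lt_irrefl _)]
      rw [pvInsertBy_all_true _ x _ (by
        intro y hy
        obtain ⟨g, hg, hyg⟩ := List.mem_flatMap.mp hy
        have h1 : pvK1 y = g := hB g y hyg
        rw [h1, decide_eq_true_eq]
        exact heq ▸ hf g hg)]
      simp
    · -- x's family comes after f
      have hne : pvK1 x ≠ f := ne_of_gt hgt
      have h0' : pvK1 x ∉ fs' → B (pvK1 x) = [] := by
        intro hn; exact h0 (by simp [hne, hn])
      have ihs := ih htl h0'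
      rw [List.flatMap_cons]
      rw [pvInsertBy_append_left _ x _ _ (by
        intro y hy
        have h1 : pvK1 y = f := hB f y hy
        rw [h1, decide_eq_false_iff_not]
        exact not_lt_of_gt hgt), ihs]
      by_cases hmem : pvK1 x ∈ fs'
      · rw [if_pos hmem, if_pos (List.mem_cons_of_mem _ hmem), List.flatMap_cons]
        simp [hne.symm]
      · rw [if_neg hmem, if_neg (by simp [hne, hmem]), pvInsertBy_cons]
        rw [show (decide ((pvK1 x) < f)) = false from by simpa using not_lt_of_gt hgt]
        simp only [Bool.false_eq_true, if_false, List.flatMap_cons]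
        simp [hne.symm]

-- M2: a stable sort by family is the concatenation of the family groups
theorem pvSorted_step {α κ : Type} [LinearOrder κ] (key : α → κ) (l : List α) (z : α) :
    PySem.List.sorted (l ++ [z]) key
      = PySem.List.insertBy (fun a b => decide (key a < key b)) z (PySem.List.sorted l key) := by
  rw [PySem.List.sorted_eq_foldl_insertBy, PySem.List.sorted_eq_foldl_insertBy, List.foldl_append]
  rfl

theorem pvFams_perm (l1 l2 : List String) (h : l1.Perm l2) :
    PySem.List.sorted (PySem.Set.ofList l1) (fun f => f)
      = PySem.List.sorted (PySem.Set.ofList l2) (fun f => f) := by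
  refine List.Perm.eq_of_pairwise (le := fun a b : String => a < b)
    (fun a b _ _ hab hba => absurd (lt_trans hab hba) (lt_irrefl _))
    (PySem.List.sorted_ofList_pairwise_lt l1) (PySem.List.sorted_ofList_pairwise_lt l2) ?_
  have n1 : (PySem.List.sorted (PySem.Set.ofList l1) (fun f => f)).Nodup :=
    List.Pairwise.imp (fun h => ne_of_lt h) (PySem.List.sorted_ofList_pairwise_lt l1)
  have n2 : (PySem.List.sorted (PySem.Set.ofList l2) (fun f => f)).Nodup :=
    List.Pairwise.imp (fun h => ne_of_lt h) (PySem.List.sorted_ofList_pairwise_lt l2)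
  refine List.perm_of_nodup_nodup_toFinset_eq n1 n2 ?_
  ext a
  simp only [List.mem_toFinset, PySem.List.mem_sorted, PySem.Set.mem_ofList]
  exact ⟨fun hm => h.mem_iff.mp hm, fun hm => h.mem_iff.mpr hm⟩

theorem pvM2 (ys : List pvR) :
    PySem.List.sorted ys pvK1 = (pvFams ys).flatMap (pvGrp ys) := by
  induction ys using List.reverseRecOn with
  | nil => rfl
  | append_singleton ys x ih =>
    rw [pvSorted_step, ih]
    have hfs : (pvFams ys).Pairwise (· < ·) := PySem.List.sorted_ofList_pairwise_lt _
    have hB : ∀ f, ∀ r ∈ pvGrp ys f, pvK1 r = f := by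
      intro f r hr
      have := List.of_mem_filter hr
      simpa using this
    have hmemFams : ∀ f, f ∈ pvFams ys ↔ f ∈ ys.map pvK1 := by
      intro f
      rw [pvFams, PySem.List.mem_sorted, PySem.Set.mem_ofList]
    have h0 : pvK1 x ∉ pvFams ys → pvGrp ys (pvK1 x) = [] := by
      intro hn
      rw [pvGrp, List.filter_eq_nil_iff]
      intro r hr hbe
      exact hn ((hmemFams _).mpr (List.mem_map.mpr ⟨r, hr, by simpa using hbe⟩))
    rw [pvH x (pvGrp ys) (pvFams ys) hfs hB h0]
    have hgrp : ∀ f, pvGrp (ys ++ [x]) f = pvGrp ys f ++ if f = pvK1 x then [x] else [] := by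
      intro f
      rw [pvGrp, pvGrp, List.filter_append]
      have hsing : List.filter (fun r => pvK1 r == f) [x] = if f = pvK1 x then [x] else [] := by
        simp only [List.filter_cons, List.filter_nil]
        by_cases h : f = pvK1 x
        · rw [if_pos h, if_pos (by simp [h])]
        · rw [if_neg h, if_neg (by simp; exact fun hh => h hh.symm)]
      rw [hsing]
    have hmapx : (ys ++ [x]).map pvK1 = ys.map pvK1 ++ [pvK1 x] := by simp
    have hof : PySem.Set.ofList ((ys ++ [x]).map pvK1)
        = PySem.Set.add (PySem.Set.ofList (ys.map pvK1)) (pvK1 x) := by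
      rw [hmapx, PySem.Set.ofList_eq_foldl, List.foldl_append, ← PySem.Set.ofList_eq_foldl]
      rfl
    by_cases hmem : pvK1 x ∈ pvFams ys
    · rw [if_pos hmem]
      have hfams : pvFams (ys ++ [x]) = pvFams ys := by
        rw [pvFams, pvFams, hof]
        have hc : PySem.Set.contains (PySem.Set.ofList (ys.map pvK1)) (pvK1 x) = true := by
          have : pvK1 x ∈ PySem.Set.ofList (ys.map pvK1) := by
            rw [PySem.Set.mem_ofList]
            exact (hmemFams _).mp hmem
          simpa [PySem.Set.contains] using this
        rw [PySem.Set.add, if_pos hc]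
      rw [hfams]
      exact pvFlatMap_congr _ _ _ (fun f _ => (hgrp f).symm)
    · rw [if_neg hmem]
      have hc : PySem.Set.contains (PySem.Set.ofList (ys.map pvK1)) (pvK1 x) = false := by
        have : pvK1 x ∉ PySem.Set.ofList (ys.map pvK1) := by
          rw [PySem.Set.mem_ofList]
          exact fun hmm => hmem ((hmemFams _).mpr hmm)
        simpa [PySem.Set.contains] using this
      have hfams : pvFams (ys ++ [x])
          = PySem.List.insertBy (fun a b => decide (a < b)) (pvK1 x) (pvFams ys) := by
        rw [pvFams, hof, PySem.Set.add, hc]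
        rw [if_neg (by simp : ¬(false = true))]
        rw [pvSorted_step]
        rfl
      rw [hfams]
      exact pvFlatMap_congr _ _ _ (fun f _ => (hgrp f).symm)

-- the two sorted lists of B, decomposed
theorem pvMain (systems : List pvR) :
    PySem.List.sorted (PySem.List.sorted systems pvK2) pvK1 =
      (pvFams systems).flatMap (pvC systems) := by
  rw [pvM2]
  have hfams : pvFams (PySem.List.sorted systems pvK2) = pvFams systems :=
    pvFams_perm _ _ ((PySem.List.sorted_perm systems pvK2 false).map pvK1)
  rw [hfams]
  refine pvFlatMap_congr _ _ _ ?_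
  intro f _
  rw [pvGrp, pvM1]
  rfl

-- emission pass lemmas
def pvStep (st : List String × Option String) (r : pvR) : List String × Option String :=
  let fam := pvFamily r.2.2.2
  let out := if st.2 ≠ some fam then st.1 ++ ["## " ++ pvTitle fam, ""] else st.1
  (out ++ ["### " ++ r.2.1, "`" ++ r.1 ++ "` — " ++ r.2.2.2] ++
     (if r.2.2.1 ≠ "" then ["- Tags: " ++ r.2.2.1] else []) ++ [""], some fam)

theorem pvE1 (f : String) (rows : List pvR) (acc : List String)
    (h : ∀ r ∈ rows, pvK1 r = f) :
    rows.foldl pvStep (acc, some f) = (acc ++ rows.flatMap pvRowL, some f) := by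
  induction rows generalizing acc with
  | nil => simp
  | cons r rs ih =>
    have hf : pvFamily r.2.2.2 = f := h r List.mem_cons_self
    rw [List.foldl_cons,
      show pvStep (acc, some f) r = (acc ++ pvRowL r, some f) from by simp [pvStep, hf, pvRowL],
      ih _ (fun z hz => h z (List.mem_cons_of_mem _ hz))]
    simp

def pvLastFam : List String → Option String → Option String
  | [], prev => prev
  | f :: fs, _ => pvLastFam fs (some f)

theorem pvE2 (C : String → List pvR) (fs : List String) (acc : List String) (prev : Option String)
    (hfs : fs.Pairwise (· < ·))
    (hC : ∀ f ∈ fs, (∀ r ∈ C f, pvK1 r = f) ∧ C f ≠ [])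
    (hprev : ∀ f ∈ fs, prev ≠ some f) :
    (fs.flatMap C).foldl pvStep (acc, prev) =
      (acc ++ fs.flatMap (fun f => pvHdrF f ++ (C f).flatMap pvRowL), pvLastFam fs prev) := by
  induction fs generalizing acc prev with
  | nil => simp [pvLastFam]
  | cons f fs' ih =>
    obtain ⟨hffs, htl⟩ := List.pairwise_cons.mp hfs
    obtain ⟨hCf, hCne⟩ := hC f List.mem_cons_self
    obtain ⟨r0, rs, hC0⟩ := List.exists_cons_of_ne_nil hCne
    have hf0 : pvFamily r0.2.2.2 = f := hCf r0 (by rw [hC0]; exact List.mem_cons_self)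
    have ih' := ih htl (fun g hg => hC g (List.mem_cons_of_mem _ hg))
      (acc := acc ++ (pvHdrF f ++ pvRowL r0) ++ rs.flatMap pvRowL) (prev := some f)
      (fun g hg => by simpa using ne_of_lt (hffs g hg))
    rw [List.flatMap_cons, List.foldl_append, hC0, List.foldl_cons,
      show pvStep (acc, prev) r0 = (acc ++ (pvHdrF f ++ pvRowL r0), some f) from by
        simp [pvStep, hf0, pvRowL, pvHdrF, if_pos (hprev f List.mem_cons_self)],
      pvE1 f rs _ (fun z hz => hCf z (by rw [hC0]; exact List.mem_cons_of_mem _ hz)),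
      ih']
    rw [pvLastFam, List.flatMap_cons, hC0, List.flatMap_cons]
    simp

-- B in normal form
theorem pvB_norm (systems : List pvR) (today : String) :
    md_systems_digest_alt systems today = PySem.Str.join "\n" (pvHeader today ++ pvBody systems) ++ "\n" := by
  simp only [md_systems_digest_alt]
  rw [show (PySem.List.sorted (PySem.List.sorted systems fun r => PySem.Str.lower r.2.2.2)
        fun r => pvFamily r.2.2.2) = (pvFams systems).flatMap (pvC systems) from pvMain systems]
  have hC : ∀ f ∈ pvFams systems, (∀ r ∈ pvC systems f, pvK1 r = f) ∧ pvC systems f ≠ [] := by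
    intro f hf
    constructor
    · intro r hr
      have := List.of_mem_filter ((PySem.List.mem_sorted _ _ _ r).mp hr)
      simpa using this
    · have hf' : f ∈ systems.map pvK1 := by
        have := (PySem.List.mem_sorted _ _ _ f).mp hf
        simpa [PySem.Set.mem_ofList] using this
      obtain ⟨r, hr, hrf⟩ := List.mem_map.mp hf'
      rw [pvC, Ne, PySem.List.sorted_eq_nil_iff, pvGrp, List.filter_eq_nil_iff]
      intro hall
      exact hall r hr (by simpa using hrf)
  have hswap : ∀ (l : List pvR) (init : List String × Option String),
      l.foldl (fun (st : List String × Option String) r =>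
        ((if st.2 ≠ some (pvFamily r.2.2.2) then st.1 ++ ["## " ++ pvTitle (pvFamily r.2.2.2), ""] else st.1) ++
           ["### " ++ r.2.1, "`" ++ r.1 ++ "` — " ++ r.2.2.2] ++
           (if r.2.2.1 ≠ "" then ["- Tags: " ++ r.2.2.1] else []) ++ [""], some (pvFamily r.2.2.2))) init
      = l.foldl pvStep init := fun l init => rfl
  rw [hswap]
  rw [show (["---", "id: PACK:SYSTEMS-DIGEST", "name: Systems Digest — Claims & Links", "status: Stable",
      "updated: " ++ today, "---", "",
      "This digest lists each system page with its ID and canonical path. Keep claims in the source pages; this file is compact routing.",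
      ""] : List String) = pvHeader today from rfl]
  rw [pvE2 (pvC systems) (pvFams systems) (pvHeader today) none
    (PySem.List.sorted_ofList_pairwise_lt _) hC (fun f _ => by simp)]
  rfl

-- ===== VERDICT (by name: the statement is the Claim_ definition above) =====
theorem md_systems_digest_spec : Claim_equal_md_systems_digest := by
  intro systems today _
  show md_systems_digest systems today = md_systems_digest_alt systems today
  rw [pvA_norm, pvB_norm]
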